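-- pv_equiv track=rewrite | github.com/gabbpuy/vindauga | vindauga/utilities/support/ansify.py | find_256_color_index
-- ===== SOURCE A (Python) =====
-- COLOR_STEPS = [0, 0x5f, 0x87, 0xaf, 0xd7, 0xff]
--
-- GRAYSCALE_STEPS = [
--     0x08, 0x12, 0x1c, 0x26, 0x30, 0x3a, 0x44, 0x4e, 0x58, 0x62, 0x6c, 0x76,
--     0x80, 0x8a, 0x94, 0x9e, 0xa8, 0xb2, 0xbc, 0xc6, 0xd0, 0xda, 0xe4, 0xee
-- ]
--
-- def find_256_color_index(r, g, b):
--     """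
--     Find the nearest 256 color index for an RGB color
--     """
--     if r == g and g == b:  # Grayscale
--         if r < 8:
--             return 16
--         if r > 248:
--             return 231
--
--         # Find closest grayscale color
--         for i, gray in enumerate(GRAYSCALE_STEPS):
--             if r <= gray:
--                 return 232 + i
--         return 231
--
--     # Find closest RGB color
--     ri = 0
--     gi = 0
--     bi = 0
--
--     for i in range(len(COLOR_STEPS)):
--         if r >= COLOR_STEPS[i]:
--             ri = i
--         if g >= COLOR_STEPS[i]:
--             gi = i
--         if b >= COLOR_STEPS[i]:
--             bi = i
--
--     return 16 + 36 * ri + 6 * gi + bi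
-- ===== SOURCE B (Python) =====
-- def find_256_color_index(r, g, b):
--     """
--     Find the nearest 256 color index for an RGB color
--     """
--     if r == g == b:  # Grayscale
--         if r < 8:
--             return 16
--         if r > 248:
--             return 231
--         # GRAYSCALE_STEPS[i] == 8 + 10*i, so the first step >= r is at i = ceil((r-8)/10)
--         i = (r + 1) // 10
--         return 231 if i >= 24 else 232 + i
--
--     def cube(v):
--         # COLOR_STEPS = [0, 0x5f, 0x87, 0xaf, 0xd7, 0xff]: steps of 40 from 0x5f
--         return 0 if v < 0x5f else min(5, 1 + (v - 0x5f) // 40)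
--
--     return 16 + 36 * cube(r) + 6 * cube(g) + cube(b)
-- ===== Notes on version B (the rewrite author's own statement) =====
-- stated objective: simpler
-- what changed: Both table scans are replaced by closed-form arithmetic: the grayscale loop over GRAYSCALE_STEPS becomes the ceiling formula (r+1)//10 clamped to 231, and the RGB loop over COLOR_STEPS becomes a per-component clamped floor division min(5, 1+(v-0x5f)//40).
import Mathlib
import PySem

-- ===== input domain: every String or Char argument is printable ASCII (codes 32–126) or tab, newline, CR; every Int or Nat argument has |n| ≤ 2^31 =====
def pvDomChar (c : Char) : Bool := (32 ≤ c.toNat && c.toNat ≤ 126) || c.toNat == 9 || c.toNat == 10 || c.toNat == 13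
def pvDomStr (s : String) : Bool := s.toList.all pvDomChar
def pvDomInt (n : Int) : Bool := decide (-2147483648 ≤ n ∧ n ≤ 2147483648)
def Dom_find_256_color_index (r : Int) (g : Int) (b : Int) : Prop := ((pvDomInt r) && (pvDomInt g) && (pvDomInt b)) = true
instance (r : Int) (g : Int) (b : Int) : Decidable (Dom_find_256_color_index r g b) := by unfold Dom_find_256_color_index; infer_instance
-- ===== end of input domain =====

-- B replaces both table scans by closed-form arithmetic (ceil for the grayscale ramp, clamped floor division for the 6-step color cube); objective: simpler.

-- ===== PORT A =====
def COLOR_STEPS : List Int := [0, 0x5f, 0x87, 0xaf, 0xd7, 0xff]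

def GRAYSCALE_STEPS : List Int :=
  [0x08, 0x12, 0x1c, 0x26, 0x30, 0x3a, 0x44, 0x4e, 0x58, 0x62, 0x6c, 0x76,
   0x80, 0x8a, 0x94, 0x9e, 0xa8, 0xb2, 0xbc, 0xc6, 0xd0, 0xda, 0xe4, 0xee]

-- the 'for i, gray in enumerate(...)' loop with its early return; [] = the fall-through 'return 231'
def pvGrayScan (r : Int) : List (Int × Int) → Int
  | [] => 231
  | (i, gray) :: rest => if r ≤ gray then 232 + i else pvGrayScan r rest

def find_256_color_index (r : Int) (g : Int) (b : Int) : Int :=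
  if r = g ∧ g = b then
    if r < 8 then 16
    else if r > 248 then 231
    else pvGrayScan r (PySem.List.enumerate GRAYSCALE_STEPS)
  else
    -- ri = gi = bi = 0; for i in range(len(COLOR_STEPS)): …  (index always in range, so pyGetD is exact)
    let st := (PySem.List.pyRange 0 6 1).foldl
      (fun (st : Int × Int × Int) i =>
        (if r ≥ PySem.List.pyGetD COLOR_STEPS i 0 then i else st.1,
         if g ≥ PySem.List.pyGetD COLOR_STEPS i 0 then i else st.2.1,
         if b ≥ PySem.List.pyGetD COLOR_STEPS i 0 then i else st.2.2)) (0, 0, 0)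
    16 + 36 * st.1 + 6 * st.2.1 + st.2.2

-- ===== PORT B =====
def pvCube (v : Int) : Int :=
  if v < 0x5f then 0 else min 5 (1 + PySem.Int.floordiv (v - 0x5f) 40)

def find_256_color_index_alt (r : Int) (g : Int) (b : Int) : Int :=
  if r = g ∧ g = b then
    if r < 8 then 16
    else if r > 248 then 231
    else
      let i := PySem.Int.floordiv (r + 1) 10
      if i ≥ 24 then 231 else 232 + i
  else 16 + 36 * pvCube r + 6 * pvCube g + pvCube b

-- ===== PRECONDITION & SPEC =====
def Spec_find_256_color_index (r : Int) (g : Int) (b : Int) (out : Int) : Prop := out = find_256_color_index_alt r g b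
instance (r : Int) (g : Int) (b : Int) (out : Int) : Decidable (Spec_find_256_color_index r g b out) := by unfold Spec_find_256_color_index; infer_instance

-- ===== CLAIM (what is proved, stated in full; the proofs are below) =====
def Claim_equal_find_256_color_index : Prop := ∀ (r : Int) (g : Int) (b : Int), Dom_find_256_color_index r g b → Spec_find_256_color_index r g b (find_256_color_index r g b)

-- ===== LEMMAS AND PROOFS =====

-- the triple loop splits into three independent single-component folds
lemma pvLoop_split (r g b : Int) (l : List Int) (x y z : Int) :
    l.foldl (fun (st : Int × Int × Int) i =>
        (if r ≥ PySem.List.pyGetD COLOR_STEPS i 0 then i else st.1,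
         if g ≥ PySem.List.pyGetD COLOR_STEPS i 0 then i else st.2.1,
         if b ≥ PySem.List.pyGetD COLOR_STEPS i 0 then i else st.2.2)) (x, y, z)
      = (l.foldl (fun a i => if r ≥ PySem.List.pyGetD COLOR_STEPS i 0 then i else a) x,
         l.foldl (fun a i => if g ≥ PySem.List.pyGetD COLOR_STEPS i 0 then i else a) y,
         l.foldl (fun a i => if b ≥ PySem.List.pyGetD COLOR_STEPS i 0 then i else a) z) := by
  induction l generalizing x y z with
  | nil => rfl
  | cons h t ih => simp only [List.foldl]; rw [ih]

-- the single-component index loop equals B's closed form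
lemma pvCube_scan (v : Int) :
    (PySem.List.pyRange 0 6 1).foldl
      (fun a i => if v ≥ PySem.List.pyGetD COLOR_STEPS i 0 then i else a) 0 = pvCube v := by
  have h : PySem.List.pyRange 0 6 1 = [0, 1, 2, 3, 4, 5] := by decide
  rw [h]
  simp only [List.foldl]
  have l0 : PySem.List.pyGetD COLOR_STEPS 0 0 = 0 := by decide
  have l1 : PySem.List.pyGetD COLOR_STEPS 1 0 = 0x5f := by decide
  have l2 : PySem.List.pyGetD COLOR_STEPS 2 0 = 0x87 := by decide
  have l3 : PySem.List.pyGetD COLOR_STEPS 3 0 = 0xaf := by decide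
  have l4 : PySem.List.pyGetD COLOR_STEPS 4 0 = 0xd7 := by decide
  have l5 : PySem.List.pyGetD COLOR_STEPS 5 0 = 0xff := by decide
  rw [l0, l1, l2, l3, l4, l5]
  unfold pvCube
  rw [PySem.Int.floordiv_eq_ediv_of_pos (by norm_num : (0:Int) < 40)]
  split_ifs <;> omega

-- the grayscale scan equals B's ceiling formula on the residual range 8 ≤ r ≤ 248
lemma pvGray_eq (r : Int) (h8 : ¬ r < 8) (h248 : ¬ r > 248) :
    pvGrayScan r (PySem.List.enumerate GRAYSCALE_STEPS)
      = (if PySem.Int.floordiv (r + 1) 10 ≥ 24 then 231 else 232 + PySem.Int.floordiv (r + 1) 10) := by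
  have hl : 8 ≤ r := by omega
  have hu : r ≤ 248 := by omega
  interval_cases r <;> decide

-- ===== VERDICT (by name: the statement is the Claim_ definition above) =====
theorem find_256_color_index_spec : Claim_equal_find_256_color_index := by
  intro r g b _
  unfold Spec_find_256_color_index find_256_color_index find_256_color_index_alt
  by_cases hgray : r = g ∧ g = b
  · rw [if_pos hgray, if_pos hgray]
    split_ifs with h1 h2
    · rfl
    · rfl
    · exact pvGray_eq r h1 h2
  · rw [if_neg hgray, if_neg hgray]
    rw [pvLoop_split, pvCube_scan, pvCube_scan, pvCube_scan]
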